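-- pv_equiv track=rewrite | github.com/onuse/em-brain | tools/log_analyzer.py | _find_pattern_length
-- ===== SOURCE A (Python) =====
-- from typing import Dict, List, Any, Optional, Tuple
--
-- def _find_pattern_length(sequence: List[str]) -> Optional[int]:
--     """Find the length of a repeating pattern in a sequence."""
--     for pattern_len in range(2, min(8, len(sequence) // 2)):
--         pattern = sequence[:pattern_len]
--         repeats = len(sequence) // pattern_len
--
--         if repeats >= 2:
--             reconstructed = (pattern * repeats)[:len(sequence)]
--             if reconstructed == sequence:
--                 return pattern_len
--     return None
-- ===== SOURCE B (Python) =====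
-- from typing import List, Optional
--
-- def _find_pattern_length(sequence: List[str]) -> Optional[int]:
--     """Find the length of a repeating pattern in a sequence."""
--     n = len(sequence)
--     limit = min(8, n // 2)
--     if limit <= 2:
--         return None
--     # minimal period of the whole sequence (p = n always qualifies)
--     per = next(p for p in range(1, n + 1)
--                if all(sequence[i] == sequence[i - p] for i in range(p, n)))
--     # the valid pattern lengths are exactly the multiples of the minimal
--     # period that divide n; return the smallest one inside A's range
--     for d in range(2, limit):
--         if d % per == 0 and n % d == 0:
--             return d
--     return None
-- # minimal-period approach
-- ===== Notes on version B (the rewrite author's own statement) =====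
-- stated objective: alternative
-- what changed: B abandons A's per-candidate tiling tests: it computes the minimal period of the whole sequence once (smallest p with sequence[i]==sequence[i-p] for all i>=p) and then returns the smallest d in A's range that is a multiple of that minimal period and divides n, correct by the Fine-Wilf periodicity lemma.
import Mathlib
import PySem

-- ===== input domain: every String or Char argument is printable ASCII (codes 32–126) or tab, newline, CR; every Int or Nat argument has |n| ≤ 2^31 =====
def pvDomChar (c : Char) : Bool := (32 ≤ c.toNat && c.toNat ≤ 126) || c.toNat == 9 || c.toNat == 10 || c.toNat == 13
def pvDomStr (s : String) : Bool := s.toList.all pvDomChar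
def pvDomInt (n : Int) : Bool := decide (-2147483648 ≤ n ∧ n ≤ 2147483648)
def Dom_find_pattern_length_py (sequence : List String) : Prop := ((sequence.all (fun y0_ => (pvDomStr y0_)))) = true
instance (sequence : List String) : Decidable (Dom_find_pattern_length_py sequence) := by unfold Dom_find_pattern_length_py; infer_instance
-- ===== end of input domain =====

-- B replaces A's per-candidate reconstruct-and-compare tests by a single minimal-period scan:
-- it finds the smallest p with sequence[i] == sequence[i-p] for all i >= p, then returns the
-- smallest candidate in A's range that is a multiple of that minimal period and divides n
-- (correct by the Fine–Wilf periodicity lemma).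

-- ===== PORT A =====
def find_pattern_length_py (sequence : List String) : Option Int :=
  (PySem.List.pyRange 2 (min 8 (PySem.Int.floordiv (sequence.length : Int) 2)) 1).findSome?
    (fun pattern_len =>
      let pattern := PySem.List.slice sequence none (some pattern_len)
      let repeats := PySem.Int.floordiv (sequence.length : Int) pattern_len
      if 2 ≤ repeats then
        let reconstructed := PySem.List.slice (PySem.List.pyRepeat pattern repeats) none (some (sequence.length : Int))
        if reconstructed = sequence then some pattern_len else none
      else none)

-- ===== PORT B =====
def find_pattern_length_py_alt (sequence : List String) : Option Int :=
  let n : Int := sequence.length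
  let limit : Int := min 8 (PySem.Int.floordiv n 2)
  if limit ≤ 2 then none
  else
    -- next(p for p in range(1, n+1) if all(sequence[i] == sequence[i-p] for i in range(p, n)))
    match (PySem.List.pyRange 1 (n + 1) 1).find? (fun p =>
        (PySem.List.pyRange p n 1).all (fun i =>
          PySem.List.pyGet? sequence i == PySem.List.pyGet? sequence (i - p))) with
    | none => none  -- unreachable: p = n vacuously satisfies the inner test
    | some per =>
        (PySem.List.pyRange 2 limit 1).find? (fun d =>
          PySem.Int.mod d per == 0 && PySem.Int.mod n d == 0)

-- ===== PRECONDITION & SPEC =====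
def Spec_find_pattern_length_py (sequence : List String) (out : Option Int) : Prop := out = find_pattern_length_py_alt sequence
instance (sequence : List String) (out : Option Int) : Decidable (Spec_find_pattern_length_py sequence out) := by unfold Spec_find_pattern_length_py; infer_instance

-- ===== CLAIM (what is proved, stated in full; the proofs are below) =====
def Claim_equal_find_pattern_length_py : Prop := ∀ (sequence : List String), Dom_find_pattern_length_py sequence → Spec_find_pattern_length_py sequence (find_pattern_length_py sequence)

-- ===== LEMMAS AND PROOFS =====

theorem pv_findSome?_congr {α β : Type} (l : List α) (f g : α → Option β)
    (h : ∀ a ∈ l, f a = g a) : l.findSome? f = l.findSome? g := by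
  induction l with
  | nil => rfl
  | cons x xs ih =>
      simp only [List.findSome?_cons, h x (by simp)]
      cases g x with
      | none => exact ih (fun a ha => h a (by simp [ha]))
      | some _ => rfl

theorem pv_findSome?_if {α : Type} (l : List α) (p : α → Bool) :
    l.findSome? (fun a => if p a = true then some a else none) = l.find? p := by
  induction l with
  | nil => rfl
  | cons x xs ih =>
      simp only [List.findSome?_cons, List.find?_cons]
      cases hp : p x <;> simp [ih]

theorem pv_find?_min (l : List Int) (p : Int → Bool) (v : Int)
    (hl : l.Pairwise (· < ·)) (h : l.find? p = some v) :
    ∀ x ∈ l, x < v → p x = false := by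
  induction l with
  | nil => simp at h
  | cons a t ih =>
      rw [List.find?_cons] at h
      cases hpa : p a with
      | true =>
          rw [hpa] at h
          injection h with h
          subst h
          intro x hx hlt
          rcases List.mem_cons.mp hx with rfl | hx
          · exact absurd hlt (lt_irrefl _)
          · exact absurd hlt (not_lt.mpr (le_of_lt ((List.pairwise_cons.mp hl).1 x hx)))
      | false =>
          rw [hpa] at h
          intro x hx hlt
          rcases List.mem_cons.mp hx with rfl | hx
          · exact hpa
          · exact ih (List.pairwise_cons.mp hl).2 h x hx hlt

theorem pv_flatten_replicate_length {α : Type} (r : Nat) (xs : List α) :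
    ((List.replicate r xs).flatten).length = r * xs.length := by
  induction r with
  | zero => simp
  | succ r ih => simp [List.replicate_succ, ih, Nat.succ_mul, Nat.add_comm]

theorem pv_flatten_replicate_getElem? {α : Type} (q : Nat)
    (xs : List α) (hq : xs.length = q) (r k : Nat) (hk : k < r * q) :
    ((List.replicate r xs).flatten)[k]? = xs[k % q]? := by
  induction r generalizing k with
  | zero => omega
  | succ r ih =>
      simp only [List.replicate_succ, List.flatten_cons]
      by_cases hlt : k < q
      · rw [List.getElem?_append_left (by omega), Nat.mod_eq_of_lt hlt]
      · rw [List.getElem?_append_right (by omega), hq,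
          Nat.mod_eq_sub_mod (by omega)]
        have hk' : k < r * q + q := by
          calc k < (r + 1) * q := hk
            _ = r * q + q := by ring
        exact ih (k - q) (by omega)

-- characterisation of A's reconstruct-and-compare test
theorem pv_key (s : List String) (q : Nat) (hq2 : 2 ≤ q) (hqN : q ≤ s.length) :
    ((List.replicate (s.length / q) (s.take q)).flatten = s) ↔
      (s.length % q = 0 ∧ ∀ k < s.length, s[k]? = s[k % q]?) := by
  set N := s.length with hN
  have hq0 : 0 < q := by omega
  have hlen : (s.take q).length = q := by simp [hN.symm ▸ hqN]
  have hflen : ((List.replicate (N / q) (s.take q)).flatten).length = (N / q) * q := by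
    rw [pv_flatten_replicate_length, hlen]
  constructor
  · intro h
    have hlen2 : (N / q) * q = N := by rw [← hflen, h]
    have hdm := Nat.div_add_mod N q
    have hmod : N % q = 0 := by rw [Nat.mul_comm] at hdm; omega
    refine ⟨hmod, fun k hk => ?_⟩
    have hkq : k % q < q := Nat.mod_lt _ hq0
    calc s[k]? = ((List.replicate (N / q) (s.take q)).flatten)[k]? := by rw [h]
      _ = (s.take q)[k % q]? := pv_flatten_replicate_getElem? q _ hlen _ _ (by omega)
      _ = s[k % q]? := by rw [List.getElem?_take_of_lt hkq]
  · rintro ⟨hmod, hper⟩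
    have hlen2 : (N / q) * q = N := by
      have := Nat.div_mul_cancel (Nat.dvd_of_mod_eq_zero hmod)
      omega
    apply List.ext_getElem?
    intro i
    by_cases hi : i < N
    · have hiq : i % q < q := Nat.mod_lt _ hq0
      rw [pv_flatten_replicate_getElem? q _ hlen _ _ (by omega),
        List.getElem?_take_of_lt hiq, ← hper i hi]
    · have h1 : ((List.replicate (N / q) (s.take q)).flatten)[i]? = none :=
        List.getElem?_eq_none (by rw [hflen]; omega)
      have h2 : s[i]? = none := List.getElem?_eq_none (by omega)
      rw [h1, h2]

-- A's loop body at candidate q, characterised by divisibility + the mod-index property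
theorem pv_Abranch (s : List String) (q : Nat) (hq2 : 2 ≤ q) (hN : 2 * q + 2 ≤ s.length) :
    (if 2 ≤ PySem.Int.floordiv (s.length : Int) (q : Int) then
       (if PySem.List.slice
             (PySem.List.pyRepeat (PySem.List.slice s none (some (q : Int)))
               (PySem.Int.floordiv (s.length : Int) (q : Int))) none (some (s.length : Int)) = s
        then some (q : Int) else none)
     else none) =
    (if (s.length % q = 0 ∧ ∀ k < s.length, s[k]? = s[k % q]?) then some (q : Int) else none) := by
  have hq0 : 0 < q := by omega
  set N := s.length with hNdef
  have hlen : (s.take q).length = q := by simp; omega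
  have hdiv : PySem.Int.floordiv (N : Int) (q : Int) = ((N / q : Nat) : Int) :=
    PySem.Int.floordiv_natCast N q
  have hrep : 2 ≤ N / q := by
    rw [Nat.le_div_iff_mul_le hq0]; omega
  have hA1 : PySem.List.slice s none (some (q : Int)) = s.take q :=
    PySem.List.slice_to_natCast s q
  rw [hA1, hdiv, if_pos (by exact_mod_cast hrep)]
  have hpyr : PySem.List.pyRepeat (s.take q) ((N / q : Nat) : Int)
      = (List.replicate (N / q) (s.take q)).flatten := by
    simp only [PySem.List.pyRepeat, Int.toNat_natCast]
  have hrec : PySem.List.slice (PySem.List.pyRepeat (s.take q) ((N / q : Nat) : Int)) none (some (N : Int))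
      = (List.replicate (N / q) (s.take q)).flatten := by
    rw [hpyr, PySem.List.slice_to_natCast]
    apply List.take_of_length_le
    rw [pv_flatten_replicate_length, hlen]
    exact Nat.div_mul_le_self N q
  rw [hrec]
  exact if_congr (pv_key s q hq2 (by omega)) rfl rfl

-- B's inner all-test at shift p is exactly "s has period p"
theorem pv_shift_iff (s : List String) (p : Nat) :
    ((PySem.List.pyRange (p : Int) (s.length : Int) 1).all (fun i =>
        PySem.List.pyGet? s i == PySem.List.pyGet? s (i - (p : Int))) = true) ↔
      List.HasPeriod s p := by
  rw [PySem.List.pyRange_one, List.all_map, List.all_eq_true, List.hasPeriod_iff_getElem?]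
  have hT : (((s.length : Int)) - (p : Int)).toNat = s.length - p := by omega
  constructor
  · intro h i hi
    have hm : i ∈ List.range (((s.length : Int)) - (p : Int)).toNat := by
      rw [hT]; exact List.mem_range.mpr hi
    have := h i hm
    simp only [Function.comp_apply] at this
    have hb : (p : Int) + (i : Int) - (p : Int) = ((i : Nat) : Int) := by ring
    have ha : (p : Int) + (i : Int) = ((p + i : Nat) : Int) := by push_cast; ring
    rw [hb, ha, PySem.List.pyGet?_natCast, PySem.List.pyGet?_natCast, beq_iff_eq] at this
    rw [Nat.add_comm i p]
    exact this.symm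
  · intro h k hk
    rw [hT] at hk
    have hk' : k < s.length - p := List.mem_range.mp hk
    simp only [Function.comp_apply]
    have hb : (p : Int) + (k : Int) - (p : Int) = ((k : Nat) : Int) := by ring
    have ha : (p : Int) + (k : Int) = ((p + k : Nat) : Int) := by push_cast; ring
    rw [hb, ha, PySem.List.pyGet?_natCast, PySem.List.pyGet?_natCast, beq_iff_eq]
    rw [Nat.add_comm p k]
    exact (h k hk').symm

-- the number-theoretic heart: with per the minimal period, a candidate d (2 ≤ d, 2d+2 ≤ n)
-- is a period dividing n  iff  it is a multiple of per dividing n  (Fine–Wilf)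
theorem pv_point (s : List String) (per : Nat) (hper1 : 1 ≤ per)
    (hHper : List.HasPeriod s per)
    (hmin : ∀ x : Nat, 1 ≤ x → x < per → ¬ List.HasPeriod s x)
    (d : Nat) (hd2 : 2 ≤ d) (hdN : 2 * d + 2 ≤ s.length) :
    (s.length % d = 0 ∧ List.HasPeriod s d) ↔ (d % per = 0 ∧ s.length % d = 0) := by
  constructor
  · rintro ⟨hdvd, hPd⟩
    refine ⟨?_, hdvd⟩
    have hperle : per ≤ d := by
      by_contra h
      exact hmin d (by omega) (by omega) hPd
    have hgpos : 0 < Nat.gcd per d := Nat.gcd_pos_of_pos_left _ (by omega)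
    have hgle : Nat.gcd per d ≤ per := Nat.le_of_dvd (by omega) (Nat.gcd_dvd_left _ _)
    have hg : List.HasPeriod s (Nat.gcd per d) :=
      hHper.gcd hPd (by omega)
    have hge : Nat.gcd per d = per := by
      by_contra h
      exact hmin _ hgpos (lt_of_le_of_ne hgle h) hg
    have : per ∣ d := hge ▸ Nat.gcd_dvd_right per d
    exact Nat.mod_eq_zero_of_dvd this
  · rintro ⟨hmod, hdvd⟩
    refine ⟨hdvd, ?_⟩
    have hpd : per ∣ d := Nat.dvd_of_mod_eq_zero hmod
    rw [List.hasPeriod_iff_forall_getElem?_mod] at hHper ⊢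
    intro i hi
    calc s[i]? = s[i % per]? := hHper i hi
      _ = s[i % d % per]? := by rw [Nat.mod_mod_of_dvd i hpd]
      _ = s[i % d]? := (hHper (i % d) (lt_of_le_of_lt (Nat.mod_le _ _) hi)).symm

-- ===== VERDICT (by name: the statement is the Claim_ definition above) =====
theorem find_pattern_length_py_spec : Claim_equal_find_pattern_length_py := by
  intro s _
  unfold Spec_find_pattern_length_py
  dsimp only [find_pattern_length_py, find_pattern_length_py_alt]
  have hfd : PySem.Int.floordiv (s.length : Int) 2 = ((s.length / 2 : Nat) : Int) :=
    PySem.Int.floordiv_natCast s.length 2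
  rw [hfd]
  have hMeq : min (8 : Int) ((s.length / 2 : Nat) : Int) = ((min 8 (s.length / 2) : Nat) : Int) := by
    omega
  rw [hMeq]
  by_cases hsmall : min 8 (s.length / 2) ≤ 2
  · rw [if_pos (by exact_mod_cast hsmall), PySem.List.pyRange_one_eq_nil (by exact_mod_cast hsmall)]
    rfl
  · have hN6 : 6 ≤ s.length := by
      have := Nat.min_le_right 8 (s.length / 2)
      omega
    rw [if_neg (by exact_mod_cast hsmall)]
    cases hfp : (PySem.List.pyRange 1 ((s.length : Int) + 1) 1).find? (fun p =>
        (PySem.List.pyRange p (s.length : Int) 1).all (fun i =>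
          PySem.List.pyGet? s i == PySem.List.pyGet? s (i - p))) with
    | none =>
        exfalso
        rw [List.find?_eq_none] at hfp
        have hmemN : ((s.length : Int)) ∈ PySem.List.pyRange 1 ((s.length : Int) + 1) 1 :=
          PySem.List.mem_pyRange_one.mpr ⟨by omega, by omega⟩
        have htrue := (pv_shift_iff s s.length).mpr (List.hasPeriod_of_length_le s _ le_rfl)
        exact hfp _ hmemN htrue
    | some per =>
        have hPtrue := List.find?_some hfp
        have hmem := List.mem_of_find?_eq_some hfp
        rw [PySem.List.mem_pyRange_one] at hmem
        have hminI := pv_find?_min _ _ _ (PySem.List.pairwise_lt_pyRange_one 1 ((s.length : Int) + 1)) hfp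
        obtain ⟨perN, rfl⟩ : ∃ m : Nat, per = (m : Int) := ⟨per.toNat, by omega⟩
        have hper1 : 1 ≤ perN := by exact_mod_cast hmem.1
        have hperN : perN ≤ s.length := by
          have := hmem.2; omega
        have hHper : List.HasPeriod s perN := (pv_shift_iff s perN).mp hPtrue
        have hminN : ∀ x : Nat, 1 ≤ x → x < perN → ¬ List.HasPeriod s x := by
          intro x h1 hx hH
          have hmx : ((x : Int)) ∈ PySem.List.pyRange 1 ((s.length : Int) + 1) 1 :=
            PySem.List.mem_pyRange_one.mpr ⟨by omega, by omega⟩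
          have hfalse := hminI (x : Int) hmx (by exact_mod_cast hx)
          have htrue := (pv_shift_iff s x).mpr hH
          rw [hfalse] at htrue
          exact Bool.false_ne_true htrue
        dsimp only
        rw [← pv_findSome?_if]
        apply pv_findSome?_congr
        intro d hd
        rw [PySem.List.mem_pyRange_one] at hd
        obtain ⟨dN, rfl⟩ : ∃ m : Nat, d = (m : Int) := ⟨d.toNat, by omega⟩
        have hd2 : 2 ≤ dN := by exact_mod_cast hd.1
        have hdlt : dN < min 8 (s.length / 2) := by exact_mod_cast hd.2
        have hdN : 2 * dN + 2 ≤ s.length := by omega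
        rw [pv_Abranch s dN hd2 hdN]
        apply if_congr ?_ rfl rfl
        have hmods : (PySem.Int.mod (dN : Int) (perN : Int) == 0 &&
            PySem.Int.mod ((s.length : Int)) ((dN : Int)) == 0) = true ↔
            (dN % perN = 0 ∧ s.length % dN = 0) := by
          rw [Bool.and_eq_true, PySem.Int.mod_natCast, PySem.Int.mod_natCast, beq_iff_eq, beq_iff_eq]
          constructor
          · rintro ⟨u, v⟩; exact ⟨by exact_mod_cast u, by exact_mod_cast v⟩
          · rintro ⟨u, v⟩; exact ⟨by exact_mod_cast u, by exact_mod_cast v⟩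
        calc (s.length % dN = 0 ∧ ∀ k < s.length, s[k]? = s[k % dN]?)
            ↔ (s.length % dN = 0 ∧ List.HasPeriod s dN) :=
              and_congr_right (fun _ => List.hasPeriod_iff_forall_getElem?_mod.symm)
          _ ↔ (dN % perN = 0 ∧ s.length % dN = 0) :=
              pv_point s perN hper1 hHper hminN dN hd2 hdN
          _ ↔ _ := hmods.symm
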